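-- pv_equiv track=rewrite | github.com/wburns02/permit-api | app/services/abuse_detector.py | _detect_sequential_pages
-- ===== SOURCE A (Python) =====
-- def _detect_sequential_pages(pages: list[int]) -> bool:
--     """Detect 3+ consecutive page numbers (e.g. 1,2,3,4,5)."""
--     if len(pages) < 3:
--         return False
--
--     sorted_pages = sorted(set(pages))
--     consecutive = 1
--     for i in range(1, len(sorted_pages)):
--         if sorted_pages[i] == sorted_pages[i - 1] + 1:
--             consecutive += 1
--             if consecutive >= 3:
--                 return True
--         else:
--             consecutive = 1
--     return False
-- ===== SOURCE B (Python) =====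
-- def _detect_sequential_pages(pages: list[int]) -> bool:
--     """Detect 3+ consecutive page numbers via set membership (no sorting)."""
--     s = set(pages)
--     return any(x + 1 in s and x + 2 in s for x in s)
-- ===== Notes on version B (the rewrite author's own statement) =====
-- stated objective: idiomatic
-- what changed: Replaces the sort-then-adjacency-scan with a sorting-free set-membership test: any element x with x+1 and x+2 also in the set witnesses a run of 3.
import Mathlib
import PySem

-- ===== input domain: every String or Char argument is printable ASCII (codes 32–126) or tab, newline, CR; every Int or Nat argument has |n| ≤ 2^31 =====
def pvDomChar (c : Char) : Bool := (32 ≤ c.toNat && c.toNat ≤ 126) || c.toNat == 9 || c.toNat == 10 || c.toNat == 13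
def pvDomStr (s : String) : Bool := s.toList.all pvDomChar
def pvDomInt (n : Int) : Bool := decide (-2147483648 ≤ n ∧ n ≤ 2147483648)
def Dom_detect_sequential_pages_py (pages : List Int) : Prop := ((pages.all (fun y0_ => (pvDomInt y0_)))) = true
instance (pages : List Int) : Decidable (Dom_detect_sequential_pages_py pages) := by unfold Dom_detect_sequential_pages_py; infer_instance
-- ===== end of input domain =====

-- B replaces A's sort-then-adjacency-scan with a sorting-free set-membership test (idiomatic; same return value).

-- ===== PORT A =====
def detect_sequential_pages_py (pages : List Int) : Bool :=
  if pages.length < 3 then false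
  else
    let sorted_pages := PySem.List.sorted (PySem.Set.ofList pages) (fun x => x) false
    ((PySem.List.pyRange 1 sorted_pages.length 1).foldl
      (fun (st : Int × Bool) i =>
        if st.2 then st
        else if PySem.List.pyGetD sorted_pages i 0 = PySem.List.pyGetD sorted_pages (i - 1) 0 + 1 then
          (st.1 + 1, decide (3 ≤ st.1 + 1))
        else (1, false))
      (1, false)).2

-- ===== PORT B =====
def detect_sequential_pages_py_alt (pages : List Int) : Bool :=
  let s : PySem.Set Int := PySem.Set.ofList pages
  s.any (fun x => PySem.Set.contains s (x + 1) && PySem.Set.contains s (x + 2))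

-- ===== PRECONDITION & SPEC =====
def Spec_detect_sequential_pages_py (pages : List Int) (out : Bool) : Prop := out = detect_sequential_pages_py_alt pages
instance (pages : List Int) (out : Bool) : Decidable (Spec_detect_sequential_pages_py pages out) := by unfold Spec_detect_sequential_pages_py; infer_instance

-- ===== CLAIM (what is proved, stated in full; the proofs are below) =====
def Claim_equal_detect_sequential_pages_py : Prop := ∀ (pages : List Int), Dom_detect_sequential_pages_py pages → Spec_detect_sequential_pages_py pages (detect_sequential_pages_py pages)

-- ===== LEMMAS AND PROOFS =====

-- the step function of A's loop, over the sorted deduplicated list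
def pvStep (sp : List Int) (st : Int × Bool) (i : Int) : Int × Bool :=
  if st.2 then st
  else if PySem.List.pyGetD sp i 0 = PySem.List.pyGetD sp (i - 1) 0 + 1 then
    (st.1 + 1, decide (3 ≤ st.1 + 1))
  else (1, false)

-- structural recursion equivalent of A's loop: c = current run length, prev = previous element
def pvRun (c : Int) (prev : Int) : List Int → Bool
  | [] => false
  | y :: t => if y = prev + 1 then (decide (3 ≤ c + 1) || pvRun (c + 1) y t) else pvRun 1 y t

def pvHasTriple (l : List Int) : Prop := ∃ a u v, l = u ++ a :: (a + 1) :: (a + 2) :: v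

lemma pvAbsorb (sp : List Int) (r : List Int) (st : Int × Bool) (h : st.2 = true) :
    r.foldl (pvStep sp) st = st := by
  induction r with
  | nil => rfl
  | cons x t ih => simpa [List.foldl, pvStep, h] using ih

lemma pvDropCons (l : List Int) (n : Nat) (h : n < l.length) :
    l.drop n = l.getD n 0 :: l.drop (n + 1) := by
  rw [List.drop_eq_getElem_cons h, List.getD_eq_getElem l 0 h]

lemma pvBridge (sp : List Int) (d : Nat) :
    ∀ (n : Nat) (c : Int), sp.length = n + 1 + d →
    ((PySem.List.pyRange ((n : Int) + 1) sp.length 1).foldl (pvStep sp) (c, false)).2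
      = pvRun c (sp.getD n 0) (sp.drop (n + 1)) := by
  induction d with
  | zero =>
    intro n c hlen
    rw [PySem.List.pyRange_one_eq_nil (by omega), List.drop_of_length_le (by omega)]
    rfl
  | succ d ih =>
    intro n c hlen
    have h1 : (n : Int) + 1 < sp.length := by omega
    rw [PySem.List.pyRange_one_cons h1]
    have hn1 : n + 1 < sp.length := by omega
    have hy : PySem.List.pyGetD sp ((n : Int) + 1) 0 = sp.getD (n + 1) 0 := by
      rw [show ((n : Int) + 1) = ((n + 1 : Nat) : Int) by push_cast; ring, PySem.List.pyGetD_natCast]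
    have hp : PySem.List.pyGetD sp ((n : Int) + 1 - 1) 0 = sp.getD n 0 := by
      rw [show ((n : Int) + 1 - 1) = ((n : Nat) : Int) by ring, PySem.List.pyGetD_natCast]
    rw [pvDropCons sp (n + 1) hn1]
    have hstep : pvStep sp (c, false) ((n : Int) + 1)
        = if sp.getD (n + 1) 0 = sp.getD n 0 + 1 then (c + 1, decide (3 ≤ c + 1)) else (1, false) := by
      simp [pvStep, hy]
    have hrun : pvRun c (sp.getD n 0) (sp.getD (n + 1) 0 :: sp.drop (n + 1 + 1))
        = if sp.getD (n + 1) 0 = sp.getD n 0 + 1 then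
            (decide (3 ≤ c + 1) || pvRun (c + 1) (sp.getD (n + 1) 0) (sp.drop (n + 1 + 1)))
          else pvRun 1 (sp.getD (n + 1) 0) (sp.drop (n + 1 + 1)) := by
      simp [pvRun]
    rw [List.foldl_cons, hstep, hrun]
    by_cases hhit : sp.getD (n + 1) 0 = sp.getD n 0 + 1
    · rw [if_pos hhit, if_pos hhit]
      by_cases h3 : (3 : Int) ≤ c + 1
      · rw [pvAbsorb sp _ _ (by simp [h3])]
        simp [h3]
      · have hih := ih (n + 1) (c + 1) (by omega)
        rw [show ((n + 1 : Nat) : Int) + 1 = (n : Int) + 1 + 1 by push_cast; ring] at hih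
        rw [show (decide (3 ≤ c + 1)) = false by simp [h3], Bool.false_or, hih]
    · rw [if_neg hhit, if_neg hhit]
      have hih := ih (n + 1) 1 (by omega)
      rw [show ((n + 1 : Nat) : Int) + 1 = (n : Int) + 1 + 1 by push_cast; ring] at hih
      rw [hih]

lemma pvRun_iff (l : List Int) : ∀ (c prev : Int), 1 ≤ c →
    (pvRun c prev l = true ↔ (2 ≤ c ∧ ∃ t, l = (prev + 1) :: t) ∨ pvHasTriple (prev :: l)) := by
  induction l with
  | nil =>
    intro c prev hc
    simp only [pvRun, pvHasTriple]
    constructor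
    · intro h; exact absurd h (by simp)
    · rintro (⟨_, t, ht⟩ | ⟨a, u, v, h⟩)
      · exact absurd ht (by simp)
      · exfalso
        rcases u with _ | ⟨x, u⟩ <;> simp_all
  | cons y t ih =>
    intro c prev hc
    by_cases hy : y = prev + 1
    · subst hy
      have heq : pvRun c prev ((prev + 1) :: t)
          = (decide (3 ≤ c + 1) || pvRun (c + 1) (prev + 1) t) := by simp [pvRun]
      rw [heq, Bool.or_eq_true, decide_eq_true_eq, ih (c + 1) (prev + 1) (by omega)]
      constructor
      · rintro (h3 | ⟨h2, t', ht'⟩ | ⟨a, u, v, h⟩)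
        · exact Or.inl ⟨by omega, t, rfl⟩
        · refine Or.inr ⟨prev, [], t', ?_⟩
          rw [ht']
          simp only [List.nil_append, List.cons.injEq]
          exact ⟨trivial, trivial, by ring, trivial⟩
        · exact Or.inr ⟨a, prev :: u, v, by simp [h]⟩
      · rintro (⟨h2, t', ht'⟩ | ⟨a, u, v, h⟩)
        · exact Or.inl (by omega)
        · rcases u with _ | ⟨x, u⟩
          · simp only [List.nil_append, List.cons.injEq] at h
            obtain ⟨ha, -, ht⟩ := h
            refine Or.inr (Or.inl ⟨by omega, v, ?_⟩)
            rw [ht, ← ha]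
            simp only [List.cons.injEq]
            exact ⟨by ring, trivial⟩
          · simp only [List.cons_append, List.cons.injEq] at h
            exact Or.inr (Or.inr ⟨a, u, v, h.2⟩)
    · have heq : pvRun c prev (y :: t) = pvRun 1 y t := by simp [pvRun, hy]
      rw [heq, ih 1 y (by omega)]
      constructor
      · rintro (⟨h2, _⟩ | ⟨a, u, v, h⟩)
        · omega
        · exact Or.inr ⟨a, prev :: u, v, by simp [h]⟩
      · rintro (⟨h2, t', ht'⟩ | ⟨a, u, v, h⟩)
        · exact absurd (List.cons.inj ht').1 hy
        · rcases u with _ | ⟨x, u⟩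
          · simp only [List.nil_append, List.cons.injEq] at h
            exact absurd (by rw [h.2.1, h.1] : y = prev + 1) hy
          · simp only [List.cons_append, List.cons.injEq] at h
            exact Or.inr ⟨a, u, v, h.2⟩

lemma pvMin_head (x : Int) (t : List Int) (hp : (x :: t).Pairwise (· < ·)) (b : Int)
    (hb : b ∈ t) (hle : b ≤ x + 1) : t = (x + 1) :: t.tail ∧ b = x + 1 := by
  rcases t with _ | ⟨h, t'⟩
  · simp at hb
  · have hx : ∀ y ∈ h :: t', x < y := fun y hy => (List.pairwise_cons.mp hp).1 y hy
    have hxh : x < h := hx h (by simp)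
    rcases List.mem_cons.mp hb with hbh | hb2
    · subst hbh
      have : b = x + 1 := by omega
      simp [this]
    · have hp2 : (h :: t').Pairwise (· < ·) := (List.pairwise_cons.mp hp).2
      have : h < b := (List.pairwise_cons.mp hp2).1 b hb2
      have hh : h = x + 1 := by omega
      have hbb : b = x + 1 := by omega
      omega

lemma pvTriple_of_mem (l : List Int) (hp : l.Pairwise (· < ·)) (x : Int)
    (h0 : x ∈ l) (h1 : x + 1 ∈ l) (h2 : x + 2 ∈ l) : pvHasTriple l := by
  induction l with
  | nil => simp at h0
  | cons a t ih =>
    by_cases hxa : x = a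
    · subst hxa
      have h1t : x + 1 ∈ t := by
        rcases List.mem_cons.mp h1 with h | h
        · omega
        · exact h
      obtain ⟨ht1, -⟩ := pvMin_head x t hp (x + 1) h1t (by omega)
      have h2t0 : x + 2 ∈ t := by
        rcases List.mem_cons.mp h2 with h | h
        · omega
        · exact h
      have h2t : x + 2 ∈ t.tail := by
        rw [ht1] at h2t0
        rcases List.mem_cons.mp h2t0 with h | h
        · omega
        · exact h
      have hpt : t.Pairwise (· < ·) := (List.pairwise_cons.mp hp).2
      rw [ht1] at hpt
      obtain ⟨ht2, -⟩ := pvMin_head (x + 1) t.tail hpt (x + 2) h2t (by omega)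
      refine ⟨x, [], t.tail.tail, ?_⟩
      simp only [List.nil_append]
      conv_lhs => rw [ht1, ht2]
      norm_num
      ring
    · have hx : ∀ y ∈ t, a < y := fun y hy => (List.pairwise_cons.mp hp).1 y hy
      have h0t : x ∈ t := by
        rcases List.mem_cons.mp h0 with h | h
        · omega
        · exact h
      have hax : a < x := hx x h0t
      have h1t : x + 1 ∈ t := by
        rcases List.mem_cons.mp h1 with h | h
        · omega
        · exact h
      have h2t : x + 2 ∈ t := by
        rcases List.mem_cons.mp h2 with h | h
        · omega
        · exact h
      obtain ⟨b, u, v, h⟩ := ih (List.pairwise_cons.mp hp).2 h0t h1t h2t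
      exact ⟨b, a :: u, v, by rw [h]; rfl⟩

lemma pvTriple_iff (l : List Int) (hp : l.Pairwise (· < ·)) :
    pvHasTriple l ↔ ∃ x, x ∈ l ∧ x + 1 ∈ l ∧ x + 2 ∈ l := by
  constructor
  · rintro ⟨a, u, v, h⟩
    exact ⟨a, by simp [h], by simp [h], by simp [h]⟩
  · rintro ⟨x, h0, h1, h2⟩
    exact pvTriple_of_mem l hp x h0 h1 h2

lemma pvTriple_length (l : List Int) (h : pvHasTriple l) : 3 ≤ l.length := by
  obtain ⟨a, u, v, h⟩ := h
  subst h; simp; omega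

lemma pvAlt_iff (pages : List Int) :
    detect_sequential_pages_py_alt pages = true ↔
      ∃ x, x ∈ PySem.Set.ofList pages ∧ x + 1 ∈ PySem.Set.ofList pages ∧ x + 2 ∈ PySem.Set.ofList pages := by
  simp only [detect_sequential_pages_py_alt, List.any_eq_true, Bool.and_eq_true,
    PySem.Set.contains_iff]

-- ===== VERDICT (by name: the statement is the Claim_ definition above) =====
theorem detect_sequential_pages_py_spec : Claim_equal_detect_sequential_pages_py := by
  intro pages _
  unfold Spec_detect_sequential_pages_py
  have hAdef : detect_sequential_pages_py pages =
      (if pages.length < 3 then false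
       else ((PySem.List.pyRange 1 (PySem.List.sorted (PySem.Set.ofList pages) (fun x => x) false).length 1).foldl
         (pvStep (PySem.List.sorted (PySem.Set.ofList pages) (fun x => x) false)) (1, false)).2) := rfl
  rw [hAdef]
  set sp := PySem.List.sorted (PySem.Set.ofList pages) (fun x => x) false with hsp
  have hperm : sp.Perm (PySem.Set.ofList pages) := PySem.List.sorted_perm _ _ _
  have hpl : sp.Pairwise (· < ·) := PySem.List.sorted_ofList_pairwise_lt pages
  have hmem : ∀ x, x ∈ sp ↔ x ∈ PySem.Set.ofList pages := fun x => hperm.mem_iff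
  have htrip : pvHasTriple sp ↔ detect_sequential_pages_py_alt pages = true := by
    rw [pvTriple_iff sp hpl, pvAlt_iff]
    constructor
    · rintro ⟨x, h0, h1, h2⟩
      exact ⟨x, (hmem x).mp h0, (hmem _).mp h1, (hmem _).mp h2⟩
    · rintro ⟨x, h0, h1, h2⟩
      exact ⟨x, (hmem x).mpr h0, (hmem _).mpr h1, (hmem _).mpr h2⟩
  have hlensp : sp.length ≤ pages.length := by
    have h1 : sp.length = (PySem.Set.ofList pages).length :=
      PySem.List.length_sorted _ _ _
    have h2 := PySem.Set.length_ofList_le pages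
    omega
  by_cases hlen : pages.length < 3
  · rw [if_pos hlen]
    cases h : detect_sequential_pages_py_alt pages
    · rfl
    · exfalso
      have h3 := pvTriple_length sp (htrip.mpr h)
      omega
  · rw [if_neg hlen]
    have hpne : pages ≠ [] := by intro h; rw [h] at hlen; simp at hlen
    obtain ⟨p, hpmem⟩ := List.exists_mem_of_ne_nil pages hpne
    have hspne : 0 < sp.length :=
      List.length_pos_of_mem ((hmem p).mpr ((PySem.Set.mem_ofList pages p).mpr hpmem))
    have hb := pvBridge sp (sp.length - 1) 0 1 (by omega)
    simp only [Nat.cast_zero, zero_add] at hb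
    rw [hb]
    have hcons : sp = sp.getD 0 0 :: sp.drop 1 := by simpa using pvDropCons sp 0 hspne
    have hrt := pvRun_iff (sp.drop 1) 1 (sp.getD 0 0) (by norm_num)
    cases h : detect_sequential_pages_py_alt pages
    · cases hr : pvRun 1 (sp.getD 0 0) (sp.drop 1)
      · rfl
      · exfalso
        rcases hrt.mp hr with ⟨h2, -⟩ | ht
        · omega
        · rw [← hcons, htrip] at ht
          simp [h] at ht
    · exact hrt.mpr (Or.inr (hcons ▸ htrip.mpr h))
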